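-- pv_equiv track=rewrite | github.com/fengxiao2019/AlgoPractice | daily/1190. Reverse Substrings Between Each Pair of Parentheses.py | reversedSubStr
-- ===== SOURCE A (Python) =====
-- from typing import List
--
-- def reversedSubStr(stack: List[str]):
--     ans = []
--     while stack:
--         peek = stack.pop()
--         if peek == '(':
--             break
--         else:
--             ans.append(peek)
--     return ans
-- ===== SOURCE B (Python) =====
-- def reversedSubStr(stack):
--     # find-split-point-then-slice: locate the last '(' at once, slice off the answer,
--     # truncate the stack in one del (same in-place mutation as A's pop loop)
--     try:
--         pos = len(stack) - 1 - stack[::-1].index('(')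
--     except ValueError:
--         pos = -1
--     ans = stack[pos + 1:][::-1]
--     del stack[max(pos, 0):]
--     return ans
-- ===== Notes on version B (the rewrite author's own statement) =====
-- stated objective: simpler
-- what changed: Replaces the incremental pop/append/break loop with an up-front search for the last '(' followed by one slice-and-reverse for the result and one del for the truncation (same in-place mutation of stack).
import Mathlib
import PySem

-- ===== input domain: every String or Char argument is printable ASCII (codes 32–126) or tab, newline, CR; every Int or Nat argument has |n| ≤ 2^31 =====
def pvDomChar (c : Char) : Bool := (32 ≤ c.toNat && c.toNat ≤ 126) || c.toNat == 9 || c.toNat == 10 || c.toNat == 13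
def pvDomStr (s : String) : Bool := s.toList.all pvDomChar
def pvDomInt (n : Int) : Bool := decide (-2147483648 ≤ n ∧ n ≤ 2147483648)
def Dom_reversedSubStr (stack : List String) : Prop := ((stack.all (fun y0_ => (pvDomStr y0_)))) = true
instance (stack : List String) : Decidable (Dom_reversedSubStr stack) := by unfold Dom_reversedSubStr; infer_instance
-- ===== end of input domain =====

-- B finds the split point at once and slices, instead of A's pop/append/break loop;
-- equivalence is about the RETURN value (the Python B performs the same in-place truncation of `stack` as A).

-- ===== PORT A =====
-- while stack: peek = stack.pop(); if peek == '(': break; else ans.append(peek)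
-- pop takes from the end, so we recurse over stack.reverse carrying ans.
def reversedSubStrGo (ans : List String) : List String → List String
  | [] => ans
  | peek :: rest => if peek = "(" then ans else reversedSubStrGo (ans ++ [peek]) rest

def reversedSubStr (stack : List String) : List String :=
  reversedSubStrGo [] stack.reverse

-- ===== PORT B =====
-- pos = len(stack) - 1 - stack[::-1].index('(')  (pos = -1 on ValueError);
-- ans = stack[pos+1:][::-1]  (the del-truncation is a side effect, not the return value)
def reversedSubStr_alt (stack : List String) : List String :=
  let pos : Int :=
    match PySem.List.index? stack.reverse "(" with
    | some i => (stack.length : Int) - 1 - (i : Int)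
    | none => -1
  (PySem.List.slice stack (some (pos + 1)) none).reverse

-- ===== PRECONDITION & SPEC =====
def Spec_reversedSubStr (stack : List String) (out : List String) : Prop := out = reversedSubStr_alt stack
instance (stack : List String) (out : List String) : Decidable (Spec_reversedSubStr stack out) := by unfold Spec_reversedSubStr; infer_instance

-- ===== CLAIM (what is proved, stated in full; the proofs are below) =====
def Claim_equal_reversedSubStr : Prop := ∀ (stack : List String), Dom_reversedSubStr stack → Spec_reversedSubStr stack (reversedSubStr stack)

-- ===== LEMMAS AND PROOFS =====

-- A's loop collects the prefix of the popped-order list up to the first '('.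
theorem reversedSubStrGo_eq (l ans : List String) :
    reversedSubStrGo ans l = ans ++ l.takeWhile (· != "(") := by
  induction l generalizing ans with
  | nil => simp [reversedSubStrGo]
  | cons p rest ih =>
    by_cases h : p = "("
    · simp [reversedSubStrGo, h, List.takeWhile]
    · have hb : (p != "(") = true := by simp [h]
      simp [reversedSubStrGo, h, List.takeWhile, ih, hb]

theorem takeWhile_ne_eq_idxOf (l : List String) :
    l.takeWhile (· != "(") =
      (match l.idxOf? "(" with
       | some i => l.take i
       | none => l) := by
  induction l with
  | nil => simp
  | cons x xs ih =>
    by_cases h : x = "("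
    · simp [h, List.takeWhile, List.idxOf?_cons]
    · have hb : (x != "(") = true := by simp [h]
      simp only [List.takeWhile, List.idxOf?_cons, beq_iff_eq, h, hb]
      cases hx : xs.idxOf? "(" with
      | none => simp [ih, hx]
      | some i => simp [ih, hx, List.take_succ_cons]

theorem reversedSubStr_spec' (stack : List String) :
    reversedSubStr stack = reversedSubStr_alt stack := by
  unfold reversedSubStr reversedSubStr_alt
  rw [reversedSubStrGo_eq, List.nil_append, takeWhile_ne_eq_idxOf,
    PySem.List.index?_eq_idxOf?]
  cases hx : stack.reverse.idxOf? "(" with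
  | none =>
    norm_num
  | some i =>
    have hi : i < stack.length := by
      have := List.idxOf?_eq_some_iff.mp hx
      simpa using this.1
    have hcast : (stack.length : Int) - 1 - (i : Int) + 1 = ((stack.length - i : Nat) : Int) := by
      omega
    simp only [hcast]
    rw [PySem.List.slice_from_natCast, List.reverse_drop]
    congr 1
    omega

-- ===== VERDICT (by name: the statement is the Claim_ definition above) =====
theorem reversedSubStr_spec : Claim_equal_reversedSubStr := by
  intro stack _
  exact reversedSubStr_spec' stack
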